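-- pv_equiv track=rewrite | github.com/Mr-oZe/AIRAN | app/utils/core.py | parsearNS
-- ===== SOURCE A (Python) =====
-- def parsearNS(ns, data):
--     """
--     Parsea la información de los servidores de nombres y verifica mensajes específicos en los datos proporcionados.
--
--     Este método toma una lista de servidores de nombres y un conjunto de datos,
--     buscando frases específicas para determinar el estado de cada servidor.
--
--     Args:
--         ns (list): Una lista de servidores de nombres.
--         data (list): Una lista de cadenas que representan la salida del escaneo.
--
--     Returns:
--         dict: Un diccionario donde las claves son los servidores de nombres y los valores son mensajes sobre su estado.
--
--     Raises:
--         ValueError: Si los argumentos no son del tipo esperado.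
--     """
--     if not isinstance(ns, list) or not isinstance(data, list):
--         raise ValueError("Ambos argumentos deben ser listas.")
--
--     name_servers_dict = {}
--     # Definir las frases a buscar y sus mensajes
--     frases_a_buscar = {
--         "Transfer failed": "Falló la transferencia de zona",
--         "no servers could be reached": "Sin acceso"
--     }
--     # Convertir data a un conjunto para búsquedas más rápidas
--     data_set = set(data)
--     # Iterar sobre los servidores de nombres
--     for index, nameserver in enumerate(ns, start=1):
--         key = f"Name Server {index}"
--         # Verificar las frases en el conjunto de data
--         for frase, mensaje in frases_a_buscar.items():
--             if any(frase in entry for entry in data_set):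
--                 name_servers_dict[nameserver] = mensaje  # Asignar solo el mensaje si se encuentra una frase
--                 continue
--     return name_servers_dict
-- ===== SOURCE B (Python) =====
-- def parsearNS(ns, data):
--     if not isinstance(ns, list) or not isinstance(data, list):
--         raise ValueError("Ambos argumentos deben ser listas.")
--     # One pass over data: "no servers could be reached" is final (it would be
--     # the last phrase assigned), "Transfer failed" only stands if the former
--     # never appears anywhere in data.
--     msg = None
--     for entry in data:
--         if "no servers could be reached" in entry:
--             msg = "Sin acceso"
--             break
--         if "Transfer failed" in entry:
--             msg = "Falló la transferencia de zona"
--     if msg is None: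
--         return {}
--     return {n: msg for n in ns}
-- ===== Notes on version B (the rewrite author's own statement) =====
-- stated objective: faster
-- what changed: A re-scans all of data for both phrases once per nameserver; B scans data a single time (breaking early on the decisive phrase) to determine the one message, then builds the result dict in one pass over ns.
import Mathlib
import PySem

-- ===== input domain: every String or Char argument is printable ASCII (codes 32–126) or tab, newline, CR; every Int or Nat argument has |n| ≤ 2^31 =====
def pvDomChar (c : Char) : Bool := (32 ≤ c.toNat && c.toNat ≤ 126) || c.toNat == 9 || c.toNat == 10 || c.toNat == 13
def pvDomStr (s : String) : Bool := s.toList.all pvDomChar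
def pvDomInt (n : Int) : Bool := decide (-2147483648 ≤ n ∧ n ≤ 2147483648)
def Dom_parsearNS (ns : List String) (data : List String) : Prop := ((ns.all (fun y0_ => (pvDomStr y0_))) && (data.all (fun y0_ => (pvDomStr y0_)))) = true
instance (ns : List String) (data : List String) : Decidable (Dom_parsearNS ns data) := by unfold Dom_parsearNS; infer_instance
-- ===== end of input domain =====

-- B replaces A's per-nameserver re-scan of the data by a single pass over data that
-- determines the (one) message, then builds the dict in one pass over ns (objective: faster).


-- ===== PORT A =====
-- the two (phrase, message) pairs of A's frases_a_buscar, in insertion order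
def frasesA : List (String × String) :=
  [("Transfer failed", "Falló la transferencia de zona"),
   ("no servers could be reached", "Sin acceso")]

def parsearNS (ns : List String) (data : List String) : List (String × String) :=
  -- data_set = set(data)
  let dataSet : List String := PySem.Set.ofList data
  -- for index, nameserver in enumerate(ns, start=1): for frase, mensaje in frases: …
  let final : PySem.Dict String String :=
    (PySem.List.enumerate ns 1).foldl
      (fun d p =>
        frasesA.foldl
          (fun d fm =>
            if dataSet.any (fun entry => PySem.Str.isIn fm.1 entry) then
              d.insert p.2 fm.2
            else d)
          d)
      PySem.Dict.empty
  final.items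

-- ===== PORT B =====
-- one pass over data: 'no servers could be reached' wins and breaks; 'Transfer failed' is kept
def findMsgB : List String → Option String → Option String
  | [], acc => acc
  | e :: rest, acc =>
    if PySem.Str.isIn "no servers could be reached" e then some "Sin acceso"
    else if PySem.Str.isIn "Transfer failed" e then
      findMsgB rest (some "Falló la transferencia de zona")
    else findMsgB rest acc

def parsearNS_alt (ns : List String) (data : List String) : List (String × String) :=
  match findMsgB data none with
  | none => []
  | some m =>
    -- {n: msg for n in ns}
    (ns.foldl (fun (d : PySem.Dict String String) n => d.insert n m) PySem.Dict.empty).items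

-- ===== PRECONDITION & SPEC =====
def Spec_parsearNS (ns : List String) (data : List String) (out : List (String × String)) : Prop := out = parsearNS_alt ns data
instance (ns : List String) (data : List String) (out : List (String × String)) : Decidable (Spec_parsearNS ns data out) := by unfold Spec_parsearNS; infer_instance

-- ===== CLAIM (what is proved, stated in full; the proofs are below) =====
def Claim_equal_parsearNS : Prop := ∀ (ns : List String) (data : List String), Dom_parsearNS ns data → Spec_parsearNS ns data (parsearNS ns data)

-- ===== LEMMAS AND PROOFS =====

-- 'any phrase in some entry of set(data)' = 'any phrase in some entry of data'
theorem any_ofList (data : List String) (p : String → Bool) :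
    (PySem.Set.ofList data).any p = data.any p := by
  by_cases h : data.any p = true
  · rw [h]
    rcases List.any_eq_true.mp h with ⟨x, hx, hp⟩
    exact List.any_eq_true.mpr ⟨x, (PySem.Set.mem_ofList data x).mpr hx, hp⟩
  · rw [Bool.eq_false_iff.mpr h, Bool.eq_false_iff]
    intro hc
    rcases List.any_eq_true.mp hc with ⟨x, hx, hp⟩
    exact h (List.any_eq_true.mpr ⟨x, (PySem.Set.mem_ofList data x).mp hx, hp⟩)

-- B's single pass, characterised by the two 'any' flags
theorem findMsgB_eq (data : List String) (acc : Option String) :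
    findMsgB data acc =
      if data.any (fun e => PySem.Str.isIn "no servers could be reached" e) then
        some "Sin acceso"
      else if data.any (fun e => PySem.Str.isIn "Transfer failed" e) then
        some "Falló la transferencia de zona"
      else acc := by
  induction data generalizing acc with
  | nil =>
    simp only [findMsgB, List.any_nil, Bool.false_eq_true, if_false]
  | cons e rest ih =>
    rw [findMsgB, List.any_cons, List.any_cons]
    by_cases hs : PySem.Str.isIn "no servers could be reached" e = true
    · rw [if_pos hs, hs, Bool.true_or]
      simp only [if_true]
    · have hs' := Bool.eq_false_iff.mpr hs
      rw [if_neg hs, hs', Bool.false_or]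
      by_cases ht : PySem.Str.isIn "Transfer failed" e = true
      · rw [if_pos ht, ih, ht, Bool.true_or]
        simp only [if_true]
        split_ifs <;> rfl
      · have ht' := Bool.eq_false_iff.mpr ht
        rw [if_neg ht, ht', Bool.false_or, ih]

-- a fold over enumerate ns 1 that ignores the index is a fold over ns
theorem foldl_enumerate_snd {β : Type} (g : β → String → β) (ns : List String) (i : Int) (d : β) :
    (PySem.List.enumerate ns i).foldl (fun d p => g d p.2) d = ns.foldl g d := by
  induction ns generalizing i d with
  | nil => simp [PySem.List.enumerate]
  | cons n rest ih => rw [PySem.List.enumerate_cons]; simp only [List.foldl_cons]; exact ih _ _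

theorem parsearNS_eq_alt (ns data : List String) : parsearNS ns data = parsearNS_alt ns data := by
  unfold parsearNS parsearNS_alt frasesA
  rw [findMsgB_eq]
  simp only [List.foldl_cons, List.foldl_nil, any_ofList]
  by_cases hs : data.any (fun e => PySem.Str.isIn "no servers could be reached" e) = true
  · by_cases ht : data.any (fun e => PySem.Str.isIn "Transfer failed" e) = true
    · simp only [hs, ht, if_true]
      have hf : (fun (d : PySem.Dict String String) (n : String) =>
          (d.insert n "Falló la transferencia de zona").insert n "Sin acceso")
          = fun d n => d.insert n "Sin acceso" := by
        funext d n
        exact PySem.Dict.insert_insert_self d n _ _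
      rw [foldl_enumerate_snd
        (g := fun d n => (PySem.Dict.insert d n "Falló la transferencia de zona").insert n "Sin acceso"), hf]
    · have ht' := Bool.eq_false_iff.mpr ht
      simp only [hs, ht', if_true, Bool.false_eq_true, if_false]
      exact congrArg _ (foldl_enumerate_snd (fun (d : PySem.Dict String String) n => d.insert n "Sin acceso") ns 1 _)
  · have hs' := Bool.eq_false_iff.mpr hs
    by_cases ht : data.any (fun e => PySem.Str.isIn "Transfer failed" e) = true
    · simp only [hs', ht, if_true, Bool.false_eq_true, if_false]
      exact congrArg _ (foldl_enumerate_snd (fun (d : PySem.Dict String String) n => d.insert n "Falló la transferencia de zona") ns 1 _)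
    · have ht' := Bool.eq_false_iff.mpr ht
      simp only [hs', ht', Bool.false_eq_true, if_false]
      rw [foldl_enumerate_snd (g := fun d _ => d)]
      simp [PySem.Dict.empty]

-- ===== VERDICT (by name: the statement is the Claim_ definition above) =====
theorem parsearNS_spec : Claim_equal_parsearNS := by
  intro ns data _
  unfold Spec_parsearNS
  exact parsearNS_eq_alt ns data
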